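-- pv_equiv track=rewrite | github.com/P4C-M4N/2048 | Game/Game.py | retirerZeroDroite
-- ===== SOURCE A (Python) =====
-- def creerGrilleTempo():
--     grilleTempo = [
--         [-1, -1, -1, -1],
--         [-1, -1, -1, -1],
--         [-1, -1, -1, -1],
--         [-1, -1, -1, -1]
--     ]
--     return grilleTempo
--
-- def retirerZeroDroite(grille):
--   grilleTempo = creerGrilleTempo()
--   for ligne in range(0, 4):
--       idColonne = 3
--       for colonne in range(3, -1, -1):
--           if grille[ligne][colonne] != 0:
--               grilleTempo[ligne][idColonne] = grille[ligne][colonne]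
--               idColonne -= 1
--   return grilleTempo
-- ===== SOURCE B (Python) =====
-- def retirerZeroDroite(grille):
--     resultat = []
--     for ligne in range(4):
--         tri = sorted(grille[ligne][:4], key=lambda v: v != 0)
--         resultat.append([-1 if v == 0 else v for v in tri])
--     return resultat
-- ===== Notes on version B (the rewrite author's own statement) =====
-- stated objective: alternative
-- what changed: Replaces A's pre-filled temp grid with backward two-pointer compaction by a stable sort of each row keyed on zero-ness (zeros first, nonzeros keep their order) followed by substituting -1 for the zeros.
import Mathlib
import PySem

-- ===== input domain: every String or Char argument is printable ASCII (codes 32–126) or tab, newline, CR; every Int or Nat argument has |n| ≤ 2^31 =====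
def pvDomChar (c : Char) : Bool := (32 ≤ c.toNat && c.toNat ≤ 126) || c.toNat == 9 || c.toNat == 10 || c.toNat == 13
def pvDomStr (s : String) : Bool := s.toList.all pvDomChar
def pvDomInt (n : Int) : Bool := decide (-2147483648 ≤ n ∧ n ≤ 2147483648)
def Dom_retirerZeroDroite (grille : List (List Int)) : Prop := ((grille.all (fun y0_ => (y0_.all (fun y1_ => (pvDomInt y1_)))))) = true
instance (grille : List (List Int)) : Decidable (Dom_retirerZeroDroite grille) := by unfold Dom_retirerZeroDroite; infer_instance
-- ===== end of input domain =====

-- B right-aligns each row by a stable sort keyed on zero-ness (zeros first, nonzeros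
-- keep their order) and then substitutes -1 for the zeros, instead of A's pre-filled
-- temp grid mutated by a backward two-pointer compaction.

-- ===== PORT A =====
def creerGrilleTempo : List (List Int) :=
  [[-1, -1, -1, -1], [-1, -1, -1, -1], [-1, -1, -1, -1], [-1, -1, -1, -1]]

-- body of A's outer loop: one `ligne` iteration (inner loop over colonne = 3,2,1,0
-- carrying the grid and idColonne); indexing via pyGetD is exact under Pre_.
def ligneStep (grille : List (List Int)) (gT : List (List Int)) (ligne : Int) : List (List Int) :=
  ((PySem.List.pyRange 3 (-1) (-1)).foldl
    (fun (st : List (List Int) × Int) (colonne : Int) =>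
      if PySem.List.pyGetD (PySem.List.pyGetD grille ligne []) colonne 0 ≠ 0 then
        (st.1.set ligne.toNat
          ((PySem.List.pyGetD st.1 ligne []).set st.2.toNat
            (PySem.List.pyGetD (PySem.List.pyGetD grille ligne []) colonne 0)),
         st.2 - 1)
      else st)
    (gT, 3)).1

def retirerZeroDroite (grille : List (List Int)) : List (List Int) :=
  (PySem.List.pyRange 0 4 1).foldl (ligneStep grille) creerGrilleTempo

-- ===== PORT B =====
-- the Python key `v != 0` is a bool (False < True); ported as the exact 0/1 indicator.
def retirerZeroDroite_alt (grille : List (List Int)) : List (List Int) :=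
  (PySem.List.pyRange 0 4 1).foldl
    (fun resultat ligne =>
      let tri := PySem.List.sorted
        (PySem.List.slice (PySem.List.pyGetD grille ligne []) none (some 4))
        (fun v => if v ≠ 0 then (1 : Int) else 0) false
      resultat ++ [tri.map (fun v => if v = 0 then (-1 : Int) else v)])
    []

-- ===== PRECONDITION & SPEC =====
-- A indexes grille[ligne][colonne] for ligne, colonne in 0..3: it raises IndexError
-- unless there are at least 4 rows and each of the first 4 rows has at least 4 entries.
def Pre_retirerZeroDroite (grille : List (List Int)) : Prop :=
  4 ≤ grille.length ∧ ∀ row ∈ grille.take 4, 4 ≤ row.length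
instance (grille : List (List Int)) : Decidable (Pre_retirerZeroDroite grille) := by
  unfold Pre_retirerZeroDroite; infer_instance
def pvWitness_retirerZeroDroite : List (List Int) :=
  [[0, 2, 0, 4], [0, 0, 0, 0], [2, 2, 2, 2], [4, 0, 0, 8]]
def Spec_retirerZeroDroite (grille : List (List Int)) (out : List (List Int)) : Prop :=
  out = retirerZeroDroite_alt grille
instance (grille : List (List Int)) (out : List (List Int)) : Decidable (Spec_retirerZeroDroite grille out) := by
  unfold Spec_retirerZeroDroite; infer_instance

-- ===== CLAIM (what is proved, stated in full; the proofs are below) =====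
def Claim_equal_retirerZeroDroite : Prop := ∀ (grille : List (List Int)), Dom_retirerZeroDroite grille → Pre_retirerZeroDroite grille → Spec_retirerZeroDroite grille (retirerZeroDroite grille)

-- ===== LEMMAS AND PROOFS =====

-- the common value of both programs' output row, as a function of the row's first four entries.
def rowCompact (a b c d : Int) : List Int :=
  let vals := [a, b, c, d].filter (fun v => v ≠ 0)
  List.replicate (4 - vals.length) (-1) ++ vals

lemma geCons (a b c d : Int) (t : List Int) :
    PySem.List.pyGetD (a :: b :: c :: d :: t) 0 0 = a ∧
    PySem.List.pyGetD (a :: b :: c :: d :: t) 1 0 = b ∧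
    PySem.List.pyGetD (a :: b :: c :: d :: t) 2 0 = c ∧
    PySem.List.pyGetD (a :: b :: c :: d :: t) 3 0 = d := by
  refine ⟨?_, ?_, ?_, ?_⟩ <;>
    (rw [PySem.List.pyGetD_eq_getElem _ 0 (by norm_num) (by simp <;> omega)]; rfl)

lemma ligneStep_eq (grille gT : List (List Int)) (ligne : Int) (a b c d : Int) (t : List Int)
    (h0 : 0 ≤ ligne) (hlen : ligne.toNat < gT.length)
    (hrow : PySem.List.pyGetD grille ligne [] = a :: b :: c :: d :: t)
    (hgt : PySem.List.pyGetD gT ligne [] = [-1, -1, -1, -1]) :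
    ligneStep grille gT ligne = gT.set ligne.toNat (rowCompact a b c d) := by
  have hr : PySem.List.pyRange 3 (-1) (-1) = [3, 2, 1, 0] := by decide
  have hget : ∀ (r : List Int), PySem.List.pyGetD (gT.set ligne.toNat r) ligne [] = r := by
    intro r
    rw [PySem.List.pyGetD_eq_getElem _ [] h0 (by simp; omega)]
    simp
  obtain ⟨e0, e1, e2, e3⟩ := geCons a b c d t
  unfold ligneStep
  rw [hr]
  simp only [List.foldl, hrow, e0, e1, e2, e3]
  have hg' : gT[ligne.toNat]'hlen = [-1, -1, -1, -1] := by
    rw [← PySem.List.pyGetD_eq_getElem gT [] h0 (by omega)]; exact hgt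
  by_cases ha : a = 0 <;> by_cases hb : b = 0 <;> by_cases hc : c = 0 <;> by_cases hd : d = 0 <;>
    simp [ha, hb, hc, hd, hgt, hget, rowCompact, List.set_set]
  rw [← hg', List.set_getElem_self]

-- B's row value: stable sort by the 0/1 zero-ness key then zero ↦ -1 gives the same row.
lemma altRow (grille : List (List Int)) (ligne a b c d : Int) (t : List Int)
    (hrow : PySem.List.pyGetD grille ligne [] = a :: b :: c :: d :: t) :
    (PySem.List.sorted
        (PySem.List.slice (PySem.List.pyGetD grille ligne []) none (some 4))
        (fun v => if v ≠ 0 then (1 : Int) else 0) false).map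
      (fun v => if v = 0 then (-1 : Int) else v) = rowCompact a b c d := by
  have hslice : PySem.List.slice (a :: b :: c :: d :: t) none (some 4) = [a, b, c, d] := by
    have := PySem.List.slice_to_natCast (a :: b :: c :: d :: t) 4
    simpa using this
  rw [hrow, hslice, PySem.List.sorted_eq_foldl_insertBy]
  by_cases ha : a = 0 <;> by_cases hb : b = 0 <;> by_cases hc : c = 0 <;> by_cases hd : d = 0 <;>
    simp_all [PySem.List.insertBy, rowCompact]

-- ===== VERDICT (by name: the statement is the Claim_ definition above) =====
theorem retirerZeroDroite_spec : Claim_equal_retirerZeroDroite := by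
  intro grille _ hpre
  obtain ⟨hlen, hrows⟩ := hpre
  match grille, hlen with
  | r0 :: r1 :: r2 :: r3 :: rest, _ =>
    have h0 := hrows r0 (by simp [List.take])
    have h1 := hrows r1 (by simp [List.take])
    have h2 := hrows r2 (by simp [List.take])
    have h3 := hrows r3 (by simp [List.take])
    obtain ⟨a0, b0, c0, d0, t0, rfl⟩ : ∃ a b c d t, r0 = a :: b :: c :: d :: t := by
      match r0, h0 with | x1 :: x2 :: x3 :: x4 :: t, _ => exact ⟨x1, x2, x3, x4, t, rfl⟩
    obtain ⟨a1, b1, c1, d1, t1, rfl⟩ : ∃ a b c d t, r1 = a :: b :: c :: d :: t := by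
      match r1, h1 with | x1 :: x2 :: x3 :: x4 :: t, _ => exact ⟨x1, x2, x3, x4, t, rfl⟩
    obtain ⟨a2, b2, c2, d2, t2, rfl⟩ : ∃ a b c d t, r2 = a :: b :: c :: d :: t := by
      match r2, h2 with | x1 :: x2 :: x3 :: x4 :: t, _ => exact ⟨x1, x2, x3, x4, t, rfl⟩
    obtain ⟨a3, b3, c3, d3, t3, rfl⟩ : ∃ a b c d t, r3 = a :: b :: c :: d :: t := by
      match r3, h3 with | x1 :: x2 :: x3 :: x4 :: t, _ => exact ⟨x1, x2, x3, x4, t, rfl⟩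
    show retirerZeroDroite _ = retirerZeroDroite_alt _
    have hr : PySem.List.pyRange 0 4 1 = [0, 1, 2, 3] := by decide
    unfold retirerZeroDroite
    rw [hr]
    simp only [List.foldl]
    rw [ligneStep_eq _ _ 0 a0 b0 c0 d0 t0 (by norm_num) (by decide)
          (by rw [PySem.List.pyGetD_eq_getElem _ [] (by norm_num) (by simp <;> omega)]; rfl) (by decide),
        ligneStep_eq _ _ 1 a1 b1 c1 d1 t1 (by norm_num) (by simp [creerGrilleTempo])
          (by rw [PySem.List.pyGetD_eq_getElem _ [] (by norm_num) (by simp <;> omega)]; rfl)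
          (by simp [creerGrilleTempo, PySem.List.pyGetD, PySem.List.pyGet?, PySem.List.pyIdx?, List.set]),
        ligneStep_eq _ _ 2 a2 b2 c2 d2 t2 (by norm_num) (by simp [creerGrilleTempo])
          (by rw [PySem.List.pyGetD_eq_getElem _ [] (by norm_num) (by simp <;> omega)]; rfl)
          (by simp [creerGrilleTempo, PySem.List.pyGetD, PySem.List.pyGet?, PySem.List.pyIdx?, List.set]),
        ligneStep_eq _ _ 3 a3 b3 c3 d3 t3 (by norm_num) (by simp [creerGrilleTempo])
          (by rw [PySem.List.pyGetD_eq_getElem _ [] (by norm_num) (by simp <;> omega)]; rfl)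
          (by simp [creerGrilleTempo, PySem.List.pyGetD, PySem.List.pyGet?, PySem.List.pyIdx?, List.set])]
    unfold retirerZeroDroite_alt
    rw [hr]
    simp only [List.foldl]
    rw [altRow _ 0 a0 b0 c0 d0 t0
          (by rw [PySem.List.pyGetD_eq_getElem _ [] (by norm_num) (by simp <;> omega)]; rfl),
        altRow _ 1 a1 b1 c1 d1 t1
          (by rw [PySem.List.pyGetD_eq_getElem _ [] (by norm_num) (by simp <;> omega)]; rfl),
        altRow _ 2 a2 b2 c2 d2 t2
          (by rw [PySem.List.pyGetD_eq_getElem _ [] (by norm_num) (by simp <;> omega)]; rfl),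
        altRow _ 3 a3 b3 c3 d3 t3
          (by rw [PySem.List.pyGetD_eq_getElem _ [] (by norm_num) (by simp <;> omega)]; rfl)]
    simp [creerGrilleTempo, List.set]
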